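-- pv_equiv track=rewrite | github.com/Kawser-nerd/CLCDSA | Source Codes/AtCoder/abc015/C/4800536.py | func
-- ===== SOURCE A (Python) =====
-- def func (v, T):
--   if len(T) ==0:
--     return v == 0
--   tt = T[0]
--   new_T = [a for a in T]
--   new_T.pop(0)
--   for t in tt:
--     if func(t^v, new_T):
--       return True
--   return False
-- ===== SOURCE B (Python) =====
-- def func(v, T):
--     reach = {v}
--     for row in T:
--         reach = {x ^ t for x in reach for t in row}
--     return 0 in reach
-- ===== Notes on version B (the rewrite author's own statement) =====
-- stated objective: faster
-- what changed: Replaced the exponential branch-per-selection recursion by a forward DP that maintains the set of reachable XOR values across rows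
import Mathlib
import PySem

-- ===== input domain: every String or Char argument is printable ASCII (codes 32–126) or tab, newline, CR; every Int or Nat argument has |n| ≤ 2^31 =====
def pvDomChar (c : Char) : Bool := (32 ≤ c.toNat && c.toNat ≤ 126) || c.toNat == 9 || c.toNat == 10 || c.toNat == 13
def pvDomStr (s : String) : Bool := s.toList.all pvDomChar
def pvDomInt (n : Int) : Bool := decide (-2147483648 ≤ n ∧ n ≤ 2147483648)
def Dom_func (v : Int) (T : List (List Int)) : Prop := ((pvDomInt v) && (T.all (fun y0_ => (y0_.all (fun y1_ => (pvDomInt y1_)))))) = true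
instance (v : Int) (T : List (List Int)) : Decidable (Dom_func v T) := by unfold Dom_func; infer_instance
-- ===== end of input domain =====

-- B replaces A's exponential one-branch-per-selection recursion by a forward DP over the set
-- of reachable XOR values (objective: faster, asymptotically).

-- ===== PORT A =====
-- A recurses: empty table → v == 0; else try every t of the first row on the rest of the table.
def func (v : Int) (T : List (List Int)) : Bool :=
  match T with
  | [] => decide (v = 0)
  | tt :: rest => tt.any (fun t => func (PySem.Int.bxor t v) rest)

-- ===== PORT B =====
-- one DP step: the set {x ^ t | x in reach, t in row}
def funcStep (S : PySem.Set Int) (row : List Int) : PySem.Set Int :=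
  PySem.Set.ofList (S.flatMap fun x => row.map fun t => PySem.Int.bxor x t)

def func_alt (v : Int) (T : List (List Int)) : Bool :=
  let reach := T.foldl funcStep (PySem.Set.ofList [v])
  decide ((0 : Int) ∈ reach)

-- ===== PRECONDITION & SPEC =====
def Spec_func (v : Int) (T : List (List Int)) (out : Bool) : Prop := out = func_alt v T
instance (v : Int) (T : List (List Int)) (out : Bool) : Decidable (Spec_func v T out) := by unfold Spec_func; infer_instance

-- ===== CLAIM (what is proved, stated in full; the proofs are below) =====
def Claim_equal_func : Prop := ∀ (v : Int) (T : List (List Int)), Dom_func v T → Spec_func v T (func v T)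

-- ===== LEMMAS AND PROOFS =====

-- membership in one DP step
theorem mem_funcStep (S : PySem.Set Int) (row : List Int) (y : Int) :
    y ∈ funcStep S row ↔ ∃ x ∈ S, ∃ t ∈ row, y = PySem.Int.bxor x t := by
  simp [funcStep, PySem.Set.mem_ofList, List.mem_flatMap, List.mem_map, eq_comm]

-- the DP invariant: 0 is reachable from S after T iff some x in S makes A succeed on T
theorem reach_invariant (T : List (List Int)) :
    ∀ (S : List Int), ((0 : Int) ∈ T.foldl funcStep S) ↔ ∃ x ∈ S, func x T = true := by
  induction T with
  | nil =>
    intro S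
    simp [func, eq_comm]
  | cons tt rest ih =>
    intro S
    rw [List.foldl_cons, ih (funcStep S tt)]
    constructor
    · rintro ⟨y, hy, hfy⟩
      rcases (mem_funcStep S tt y).mp hy with ⟨x, hx, t, ht, rfl⟩
      refine ⟨x, hx, ?_⟩
      simp only [func, List.any_eq_true]
      exact ⟨t, ht, by rwa [PySem.Int.bxor_comm]⟩
    · rintro ⟨x, hx, hfx⟩
      simp only [func, List.any_eq_true] at hfx
      rcases hfx with ⟨t, ht, hf⟩
      exact ⟨PySem.Int.bxor x t, (mem_funcStep S tt _).mpr ⟨x, hx, t, ht, rfl⟩,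
        by rwa [PySem.Int.bxor_comm] at hf⟩

-- ===== VERDICT (by name: the statement is the Claim_ definition above) =====
theorem func_spec : Claim_equal_func := by
  intro v T _
  unfold Spec_func func_alt
  have h := reach_invariant T (PySem.Set.ofList [v])
  simp only [PySem.Set.mem_ofList, List.mem_singleton] at h
  rcases hb : func v T with _ | _
  · symm
    simp only [decide_eq_false_iff_not]
    intro h0
    rcases h.mp h0 with ⟨x, rfl, hx⟩
    simp [hb] at hx
  · exact (decide_eq_true (h.mpr ⟨v, rfl, hb⟩)).symm
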